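-- pv_equiv track=rewrite | github.com/hyperbard/hyperbard | src/hyperbard/clique_expansions.py | character_rank_dictionary
-- ===== SOURCE A (Python) =====
-- def character_rank_dictionary(centrality_ranking):
--     rank_dict = dict()
--     rank = 1
--     for (characters, _) in centrality_ranking:
--         for character in characters:
--             rank_dict[character] = rank
--         rank += len(characters)
--     return rank_dict
-- ===== SOURCE B (Python) =====
-- def character_rank_dictionary(centrality_ranking):
--     # pass 1: starting rank of each group = prefix sums of group sizes
--     starts = [1]
--     for characters, _ in centrality_ranking:
--         starts.append(starts[-1] + len(characters))
--     # pass 2: assign each group its precomputed start rank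
--     rank_dict = {}
--     for (characters, _), start in zip(centrality_ranking, starts):
--         for character in characters:
--             rank_dict[character] = start
--     return rank_dict
-- ===== Notes on version B (the rewrite author's own statement) =====
-- stated objective: alternative
-- what changed: The running rank accumulator is replaced by a separate first pass that builds an explicit prefix-sum table of group start ranks, which a second pass zips with the groups.
import Mathlib
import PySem

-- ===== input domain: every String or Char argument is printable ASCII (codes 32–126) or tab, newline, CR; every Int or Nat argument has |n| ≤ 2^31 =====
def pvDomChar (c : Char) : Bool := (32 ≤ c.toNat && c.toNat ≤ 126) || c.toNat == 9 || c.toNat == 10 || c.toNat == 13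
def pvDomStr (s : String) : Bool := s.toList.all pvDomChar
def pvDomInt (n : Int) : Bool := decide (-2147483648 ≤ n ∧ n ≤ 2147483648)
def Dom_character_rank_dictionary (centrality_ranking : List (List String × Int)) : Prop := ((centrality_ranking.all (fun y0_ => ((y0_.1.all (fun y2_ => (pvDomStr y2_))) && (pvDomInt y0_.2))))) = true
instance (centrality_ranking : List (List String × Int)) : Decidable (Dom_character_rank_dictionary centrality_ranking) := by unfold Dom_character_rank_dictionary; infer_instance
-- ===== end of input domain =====

-- B re-implements A with a separate prefix-sum pass computing each group's start rank,
-- then zips groups with their starts; equal return values proved on all inputs.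
-- ===== PORT A =====
def character_rank_dictionary (centrality_ranking : List (List String × Int)) : List (String × Int) :=
  (centrality_ranking.foldl
      (fun (st : PySem.Dict String Int × Int) g =>
        (g.1.foldl (fun d c => d.insert c st.2) st.1, st.2 + (g.1.length : Int)))
      ((PySem.Dict.empty : PySem.Dict String Int), 1)).1.items

-- ===== PORT B =====
def character_rank_dictionary_alt (centrality_ranking : List (List String × Int)) : List (String × Int) :=
  -- pass 1: starts[-1] is modelled by getLastD (the list is never empty)
  let starts : List Int :=
    centrality_ranking.foldl (fun s g => s ++ [s.getLastD 0 + (g.1.length : Int)]) [(1 : Int)]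
  -- pass 2: zip groups with their precomputed start ranks
  ((centrality_ranking.zip starts).foldl
      (fun (d : PySem.Dict String Int) p =>
        p.1.1.foldl (fun d c => d.insert c p.2) d)
      (PySem.Dict.empty : PySem.Dict String Int)).items

-- ===== PRECONDITION & SPEC =====
def Spec_character_rank_dictionary (centrality_ranking : List (List String × Int)) (out : List (String × Int)) : Prop := out = character_rank_dictionary_alt centrality_ranking
instance (centrality_ranking : List (List String × Int)) (out : List (String × Int)) : Decidable (Spec_character_rank_dictionary centrality_ranking out) := by unfold Spec_character_rank_dictionary; infer_instance

-- ===== CLAIM =====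
def Claim_equal_character_rank_dictionary : Prop := ∀ (centrality_ranking : List (List String × Int)), Dom_character_rank_dictionary centrality_ranking → Spec_character_rank_dictionary centrality_ranking (character_rank_dictionary centrality_ranking)

-- ===== LEMMAS AND PROOFS =====

-- reference form of the prefix-sum table, starting at r
def crdStarts (r : Int) : List (List String × Int) → List Int
  | [] => [r]
  | g :: rest => r :: crdStarts (r + (g.1.length : Int)) rest

theorem crd_starts_foldl (cr : List (List String × Int)) (pre : List Int) (r : Int) :
    cr.foldl (fun s g => s ++ [s.getLastD 0 + (g.1.length : Int)]) (pre ++ [r])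
      = pre ++ crdStarts r cr := by
  induction cr generalizing pre r with
  | nil => simp [crdStarts]
  | cons g rest ih =>
    simp only [List.foldl_cons, crdStarts]
    have h : (pre ++ [r]).getLastD 0 = r := by simp
    rw [h, List.append_assoc]
    have := ih (pre ++ [r]) (r + (g.1.length : Int))
    simpa using this

theorem crd_zip_fold (cr : List (List String × Int)) (d : PySem.Dict String Int) (r : Int) :
    (cr.zip (crdStarts r cr)).foldl
        (fun (d : PySem.Dict String Int) p =>
          p.1.1.foldl (fun d c => d.insert c p.2) d) d
      = (cr.foldl
          (fun (st : PySem.Dict String Int × Int) g =>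
            (g.1.foldl (fun d c => d.insert c st.2) st.1, st.2 + (g.1.length : Int)))
          (d, r)).1 := by
  induction cr generalizing d r with
  | nil => simp [crdStarts]
  | cons g rest ih =>
    simp only [crdStarts, List.zip_cons_cons, List.foldl_cons]
    exact ih _ _

-- ===== VERDICT =====
theorem character_rank_dictionary_spec : Claim_equal_character_rank_dictionary := by
  intro cr _
  unfold Spec_character_rank_dictionary character_rank_dictionary character_rank_dictionary_alt
  have hs := crd_starts_foldl cr [] 1
  simp only [List.nil_append] at hs
  rw [hs]
  exact congrArg PySem.Dict.items (crd_zip_fold cr PySem.Dict.empty 1).symm
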